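-- pv_equiv track=rewrite | github.com/AdamZhouSE/pythonHomework | Code/CodeRecords/2417/39190/304416.py | func30
-- ===== SOURCE A (Python) =====
-- def func30(arr):
--     arr.sort()
--     for i in range(len(arr)):
--         for j in range(i,len(arr)):
--             m=int(arr[i])
--             n=int(arr[j])
--             while n%m!=0:
--                 tmp=n%m
--                 n=m
--                 m=tmp
--             if m==1:
--                 return True
--     return False
-- ===== SOURCE B (Python) =====
-- def _prime_factors(x):
--     # distinct prime factors of x (x >= 1) by trial division
--     primes = []
--     t = x
--     p = 2
--     while p * p <= t:
--         if t % p == 0: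
--             primes.append(p)
--             while t % p == 0:
--                 t //= p
--         p += 1
--     if t > 1:
--         primes.append(t)
--     return primes
--
--
-- def func30(arr):
--     # Single left-to-right pass; counts earlier coprime partners via Mobius
--     # inclusion-exclusion over each element's squarefree divisors.
--     if 1 in arr:
--         return True
--     cnt = {}
--     for x in arr:
--         if x <= 0:
--             continue
--         # (squarefree divisor, Mobius sign) pairs of x
--         divs = [(1, 1)]
--         for q in _prime_factors(x):
--             divs = divs + [(d * q, -s) for (d, s) in divs]
--         # number of previously seen positive elements coprime to x
--         coprime = sum(s * cnt.get(d, 0) for (d, s) in divs)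
--         if coprime > 0:
--             return True
--         for d, _ in divs:
--             cnt[d] = cnt.get(d, 0) + 1
--     return False
-- ===== Notes on version B (the rewrite author's own statement) =====
-- stated objective: faster
-- what changed: Replaces A's sort plus all-ordered-pairs hand-rolled Euclid gcd scan by a single left-to-right pass that counts earlier coprime partners of each element with a hash counter over its squarefree divisors via Mobius inclusion-exclusion (trial-division factorization), returning on the first positive count.
import Mathlib
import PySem

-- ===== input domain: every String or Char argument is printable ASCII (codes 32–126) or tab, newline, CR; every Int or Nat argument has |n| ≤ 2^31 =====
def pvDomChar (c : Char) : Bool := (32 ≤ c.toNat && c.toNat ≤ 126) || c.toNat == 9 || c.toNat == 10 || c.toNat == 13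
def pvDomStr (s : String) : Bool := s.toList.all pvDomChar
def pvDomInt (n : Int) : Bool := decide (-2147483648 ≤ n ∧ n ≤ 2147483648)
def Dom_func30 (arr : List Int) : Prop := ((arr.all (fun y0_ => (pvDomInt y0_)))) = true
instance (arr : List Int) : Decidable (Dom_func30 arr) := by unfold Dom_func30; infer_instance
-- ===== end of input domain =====

-- B replaces A's sort + all-pairs hand-rolled Euclid scan by a single pass that counts
-- earlier coprime partners via Mobius inclusion-exclusion over squarefree divisors.
-- (Python A sorts `arr` in place; the equivalence proved here is about the return value only.)


-- ===== PORT A =====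
-- termination fact for the hand-rolled Euclid loop (cited by `decreasing_by`)
theorem pv_mod_natAbs_lt (n m : Int) (hm : m ≠ 0) : (PySem.Int.mod n m).natAbs < m.natAbs := by
  rcases lt_or_gt_of_ne hm with h | h
  · have h1 := PySem.Int.mod_neg_bounds n h
    omega
  · have h1 := PySem.Int.mod_nonneg n h
    have h2 := PySem.Int.mod_lt n h
    omega

-- `while n % m != 0: tmp = n % m; n = m; m = tmp` then `return m`
-- (for m = 0 Python raises ZeroDivisionError; excluded by Pre_func30, the guard returns m)
def pyEuclid (m n : Int) : Int :=
  if _hm : m = 0 then m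
  else if PySem.Int.mod n m = 0 then m
  else pyEuclid (PySem.Int.mod n m) m
termination_by m.natAbs
decreasing_by exact pv_mod_natAbs_lt n m _hm

def func30 (arr : List Int) : Bool :=
  let s := PySem.List.sorted arr (fun x => x)
  (PySem.List.pyRange 0 (PySem.List.len s) 1).any (fun i =>
    (PySem.List.pyRange i (PySem.List.len s) 1).any (fun j =>
      decide (pyEuclid (PySem.List.pyGetD s i 0) (PySem.List.pyGetD s j 0) = 1)))

-- ===== PORT B =====
-- termination fact for the inner `while t % p == 0: t //= p` loop
theorem pv_ediv_lt (a b : Int) (h : 0 < a) (h2 : 1 < b) : a / b < a := by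
  apply Int.ediv_lt_of_lt_mul (by omega)
  nlinarith

theorem pv_strip_dec (t p : Int) (h2 : 2 ≤ p) (h0 : 0 < t) :
    (PySem.Int.floordiv t p).toNat < t.toNat := by
  rw [PySem.Int.floordiv_eq_ediv_of_pos (by omega)]
  have h1 : t / p < t := pv_ediv_lt t p h0 (by omega)
  have h3 : 0 ≤ t / p := Int.ediv_nonneg (le_of_lt h0) (by omega)
  omega

-- `while t % p == 0: t //= p`  (the `2 ≤ p ∧ 0 < t` guard is a totality guard only:
-- it holds at every call reached from `facLoop x 2 []` with 0 < x)
def stripFac (t p : Int) : Int :=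
  if h : 2 ≤ p ∧ 0 < t then
    if PySem.Int.mod t p = 0 then stripFac (PySem.Int.floordiv t p) p else t
  else t
termination_by t.toNat
decreasing_by exact pv_strip_dec t p h.1 h.2

theorem stripFac_le (t p : Int) : stripFac t p ≤ t := by
  fun_induction stripFac t p
  all_goals try omega
  rename_i t h hmod ih
  have h2 : PySem.Int.floordiv t p ≤ t := by
    rw [PySem.Int.floordiv_eq_ediv_of_pos (by omega)]
    exact le_of_lt (pv_ediv_lt t p h.2 (by omega))
  omega

-- outer trial-division loop `while p * p <= t: ...`
def facLoop (t p : Int) (primes : List Int) : List Int × Int :=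
  if h : p * p ≤ t then
    if PySem.Int.mod t p = 0 then
      facLoop (stripFac t p) (p + 1) (primes ++ [p])
    else facLoop t (p + 1) primes
  else (primes, t)
termination_by (t + 1 - p).toNat
decreasing_by
  · have h1 := stripFac_le t p
    have hpt : p ≤ t := by nlinarith [sq_nonneg p, sq_nonneg (p - 1)]
    omega
  · have hpt : p ≤ t := by nlinarith [sq_nonneg p, sq_nonneg (p - 1)]
    omega

-- `_prime_factors(x)`: trial-divide, then append the leftover t if t > 1
def primesOf (x : Int) : List Int :=
  let ft := facLoop x 2 []
  if 1 < ft.2 then ft.1 ++ [ft.2] else ft.1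

-- `divs = divs + [(d * q, -s) for (d, s) in divs]`
def divsStep (divs : List (Int × Int)) (q : Int) : List (Int × Int) :=
  divs ++ divs.map (fun ds => (ds.1 * q, -ds.2))

-- the `for x in arr:` pass with the counter dict
def altLoop (cnt : PySem.Dict Int Int) : List Int → Bool
  | [] => false
  | x :: rest =>
    if x ≤ 0 then altLoop cnt rest
    else
      let divs := (primesOf x).foldl divsStep [((1 : Int), (1 : Int))]
      let coprime := (divs.map (fun ds => ds.2 * cnt.getD ds.1 0)).sum
      if 0 < coprime then true
      else altLoop (divs.foldl (fun c ds => c.modify ds.1 0 (· + 1)) cnt) rest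

def func30_alt (arr : List Int) : Bool :=
  if arr.contains 1 then true else altLoop PySem.Dict.empty arr

-- ===== PRECONDITION & SPEC =====
-- A raises ZeroDivisionError exactly when 0 occurs in arr (a 0 is always reached before
-- any True: elements before it in sorted order are negative and a negative pseudo-gcd
-- never equals 1); those inputs are excluded.
def Pre_func30 (arr : List Int) : Prop := (0 : Int) ∉ arr
instance (arr : List Int) : Decidable (Pre_func30 arr) := by unfold Pre_func30; infer_instance
def pvWitness_func30 : List Int := [2, 3]

def Spec_func30 (arr : List Int) (out : Bool) : Prop := out = func30_alt arr
instance (arr : List Int) (out : Bool) : Decidable (Spec_func30 arr out) := by unfold Spec_func30; infer_instance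

-- ===== CLAIM (what is proved, stated in full; the proofs are below) =====
def Claim_equal_func30 : Prop := ∀ (arr : List Int), Dom_func30 arr → Pre_func30 arr → Spec_func30 arr (func30 arr)

-- ===== LEMMAS AND PROOFS =====

-- Both programs decide this proposition: "arr contains 1, or two distinct positive
-- values that are coprime".
def PairProp (l : List Int) : Prop :=
  (1 : Int) ∈ l ∨ ∃ a b : Int, a ∈ l ∧ b ∈ l ∧ 0 < a ∧ 0 < b ∧ a ≠ b ∧ Int.gcd a b = 1

-- ---- A-side lemmas ----

theorem pv_gcd_emod (m n : Int) : Int.gcd (n % m) m = Int.gcd m n := by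
  apply Nat.dvd_antisymm
  · have h1 : (↑(Int.gcd (n % m) m) : Int) ∣ n % m := Int.gcd_dvd_left _ _
    have h2 : (↑(Int.gcd (n % m) m) : Int) ∣ m := Int.gcd_dvd_right _ _
    have h3 : (↑(Int.gcd (n % m) m) : Int) ∣ n := by
      have he : n % m + m * (n / m) = n := Int.emod_add_mul_ediv n m
      calc (↑(Int.gcd (n % m) m) : Int) ∣ n % m + m * (n / m) := dvd_add h1 (h2.mul_right _)
        _ = n := he
    exact Int.dvd_gcd h2 h3
  · have h1 : (↑(Int.gcd m n) : Int) ∣ m := Int.gcd_dvd_left _ _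
    have h2 : (↑(Int.gcd m n) : Int) ∣ n := Int.gcd_dvd_right _ _
    have h3 : (↑(Int.gcd m n) : Int) ∣ n % m := by
      have he : n % m = n - m * (n / m) := by
        have := Int.emod_add_mul_ediv n m; omega
      rw [he]
      exact dvd_sub h2 (h1.mul_right _)
    exact Int.dvd_gcd h3 h1

theorem pyEuclid_pos (m n : Int) : 0 < m → pyEuclid m n = (Int.gcd m n : Int) := by
  fun_induction pyEuclid m n
  · rename_i hm; intro h; omega
  · rename_i m n hm hmod
    intro h
    have hdvd : m ∣ n := (PySem.Int.mod_eq_zero_iff_dvd n m).mp hmod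
    have : Int.gcd m n = m.natAbs := by
      rw [Int.gcd_eq_natAbs]
      exact Nat.gcd_eq_left (Int.natAbs_dvd_natAbs.mpr hdvd)
    rw [this, Int.natAbs_of_nonneg (le_of_lt h)]
  · rename_i m n hm hmod ih
    intro h
    have hpos : 0 < PySem.Int.mod n m := by
      have := PySem.Int.mod_nonneg n h
      omega
    rw [ih hpos]
    rw [PySem.Int.mod_eq_emod_of_pos h, pv_gcd_emod]

theorem pyEuclid_neg (m n : Int) : m < 0 → pyEuclid m n < 0 := by
  fun_induction pyEuclid m n
  · rename_i hm; intro h; omega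
  · rename_i m n hm hmod; intro h; exact h
  · rename_i m n hm hmod ih
    intro h
    apply ih
    have := PySem.Int.mod_neg_bounds n h
    omega

theorem func30_iff (arr : List Int) : func30 arr = true ↔ PairProp arr := by
  have hperm : (PySem.List.sorted arr (fun x => x)).Perm arr := PySem.List.sorted_perm arr _ false
  set s := PySem.List.sorted arr (fun x => x) with hs
  have hmem : ∀ z : Int, z ∈ s ↔ z ∈ arr := fun z => hperm.mem_iff
  have hstruct : func30 arr = true ↔ ∃ i : Int, (0 ≤ i ∧ i < (s.length : Int)) ∧
      ∃ j : Int, (i ≤ j ∧ j < (s.length : Int)) ∧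
        pyEuclid (PySem.List.pyGetD s i 0) (PySem.List.pyGetD s j 0) = 1 := by
    simp [func30, List.any_eq_true, PySem.List.mem_pyRange_one, PySem.List.len_eq, ← hs]
  rw [hstruct]
  constructor
  · rintro ⟨i, ⟨hi0, hil⟩, j, ⟨hij, hjl⟩, he⟩
    have hit : i.toNat < s.length := by omega
    have hjt : j.toNat < s.length := by omega
    rw [PySem.List.pyGetD_eq_getElem s 0 hi0 hil, PySem.List.pyGetD_eq_getElem s 0 (by omega) hjl] at he
    set a := s[i.toNat] with ha
    set b := s[j.toNat] with hb
    have hapos : 0 < a := by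
      rcases lt_trichotomy a 0 with h | h | h
      · exact absurd he (by have := pyEuclid_neg a b h; omega)
      · rw [h] at he; simp [pyEuclid] at he
      · exact h
    have hg : Int.gcd a b = 1 := by
      rw [pyEuclid_pos a b hapos] at he
      exact_mod_cast he
    have hba : a ≤ b := PySem.List.sorted_id_getElem_mono arr (by omega) hjt
    by_cases hab : a = b
    · left
      rw [← hmem]
      have : a = 1 := by
        rw [hab, Int.gcd_self] at hg
        omega
      rw [← this]; exact List.getElem_mem hit
    · right
      exact ⟨a, b, (hmem a).mp (List.getElem_mem hit), (hmem b).mp (List.getElem_mem hjt),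
        hapos, by omega, hab, hg⟩
  · intro hp
    rcases hp with h1 | ⟨a, b, ha, hb, hpa, hpb, hab, hg⟩
    · obtain ⟨k, hk, hks⟩ := List.getElem_of_mem ((hmem 1).mpr h1)
      refine ⟨(k : Int), ⟨by omega, by omega⟩, (k : Int), ⟨le_refl _, by omega⟩, ?_⟩
      rw [PySem.List.pyGetD_eq_getElem s 0 (by omega) (by omega)]
      simp only [Int.toNat_natCast, hks]
      rw [pyEuclid_pos 1 1 (by omega)]
      rfl
    · obtain ⟨ia, hia, hsa⟩ := List.getElem_of_mem ((hmem a).mpr ha)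
      obtain ⟨ib, hib, hsb⟩ := List.getElem_of_mem ((hmem b).mpr hb)
      have hne : ia ≠ ib := by
        intro hh; subst hh; exact hab (hsa.symm.trans hsb)
      rcases lt_or_gt_of_ne hne with hlt | hgt
      · refine ⟨(ia : Int), ⟨by omega, by omega⟩, (ib : Int), ⟨by omega, by omega⟩, ?_⟩
        rw [PySem.List.pyGetD_eq_getElem s 0 (by omega) (by omega),
            PySem.List.pyGetD_eq_getElem s 0 (by omega) (by omega)]
        simp only [Int.toNat_natCast, hsa, hsb]
        rw [pyEuclid_pos a b hpa, hg]
        rfl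
      · refine ⟨(ib : Int), ⟨by omega, by omega⟩, (ia : Int), ⟨by omega, by omega⟩, ?_⟩
        rw [PySem.List.pyGetD_eq_getElem s 0 (by omega) (by omega),
            PySem.List.pyGetD_eq_getElem s 0 (by omega) (by omega)]
        simp only [Int.toNat_natCast, hsa, hsb]
        rw [pyEuclid_pos b a hpb, Int.gcd_comm, hg]
        rfl

-- ---- B-side lemmas ----

theorem stripFac_spec (t p : Int) : 2 ≤ p → 0 < t →
    0 < stripFac t p ∧ stripFac t p ∣ t ∧ ¬ p ∣ stripFac t p ∧
      (∀ r : Int, Prime r → r ∣ t → ¬ r ∣ p → r ∣ stripFac t p) := by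
  fun_induction stripFac t p
  · rename_i t h hmod ih
    intro h2 h0
    have hdvd : p ∣ t := (PySem.Int.mod_eq_zero_iff_dvd t p).mp hmod
    have hq : p * PySem.Int.floordiv t p = t := by
      rw [PySem.Int.floordiv_eq_ediv_of_pos (by omega)]
      exact Int.mul_ediv_cancel' hdvd
    have hpos : 0 < PySem.Int.floordiv t p := by
      rcases le_or_gt (PySem.Int.floordiv t p) 0 with hle | hlt
      · nlinarith
      · exact hlt
    obtain ⟨i1, i2, i3, i4⟩ := ih h2 hpos
    refine ⟨i1, i2.trans (dvd_of_mul_left_eq p hq), i3, ?_⟩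
    intro r hr hrt hrp
    apply i4 r hr ?_ hrp
    have : r ∣ p * PySem.Int.floordiv t p := by rw [hq]; exact hrt
    rcases (hr.dvd_mul.mp this) with h | h
    · exact absurd h hrp
    · exact h
  · rename_i t h hmod
    intro h2 h0
    exact ⟨h0, dvd_refl t, fun hc => hmod ((PySem.Int.mod_eq_zero_iff_dvd t p).mpr hc), fun r _ hrt _ => hrt⟩
  · rename_i h
    intro h2 h0
    exact absurd ⟨h2, h0⟩ h

theorem pv_int_prime_of_no_small_div (t : Int) (h1 : 1 < t)
    (hno : ∀ k : Int, 2 ≤ k → k * k ≤ t → ¬ k ∣ t) : Prime t := by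
  rw [Int.prime_iff_natAbs_prime]
  by_contra hnp
  have h2 : 2 ≤ t.natAbs := by omega
  have hsq := Nat.minFac_sq_le_self (by omega) hnp
  have hp := Nat.minFac_prime (show t.natAbs ≠ 1 by omega)
  have hd := Nat.minFac_dvd t.natAbs
  apply hno ((t.natAbs.minFac : Nat) : Int) (by exact_mod_cast hp.two_le) ?_ ?_
  · have h5 : ((t.natAbs.minFac : Nat) : Int) ^ 2 ≤ t := by
      have h6 : ((t.natAbs.minFac ^ 2 : Nat) : Int) ≤ ((t.natAbs : Nat) : Int) := by exact_mod_cast hsq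
      push_cast at h6
      rwa [abs_of_pos (show (0:Int) < t by omega)] at h6
    nlinarith [h5]
  · have : (t.natAbs.minFac : Int) ∣ (t.natAbs : Int) := by exact_mod_cast hd
    rwa [Int.natAbs_of_nonneg (show (0:Int) ≤ t by omega)] at this

theorem pv_prime_dvd_prime (r q : Int) (hr : Prime r) (hq : Prime q) (hr0 : 0 < r) (hq0 : 0 < q)
    (h : r ∣ q) : r = q := by
  have h1 : r.natAbs ∣ q.natAbs := Int.natAbs_dvd_natAbs.mpr h
  have h2 := (Nat.prime_dvd_prime_iff_eq (Int.prime_iff_natAbs_prime.mp hr)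
    (Int.prime_iff_natAbs_prime.mp hq)).mp h1
  omega

theorem facLoop_inv (x : Int) (_hx : 0 < x) : ∀ (t p : Int) (primes : List Int),
    2 ≤ p → 0 < t → t ∣ x →
    (∀ k : Int, 2 ≤ k → k < p → ¬ k ∣ t) →
    (∀ q ∈ primes, Prime q ∧ 0 < q ∧ q ∣ x ∧ q < p) →
    (∀ r : Int, Prime r → 0 < r → r ∣ x → r ∈ primes ∨ r ∣ t) →
    primes.Pairwise (· < ·) →
    let res := facLoop t p primes
    let P := if 1 < res.2 then res.1 ++ [res.2] else res.1
    (∀ q ∈ P, Prime q ∧ 0 < q ∧ q ∣ x) ∧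
      (∀ r : Int, Prime r → 0 < r → r ∣ x → r ∈ P) ∧ P.Pairwise (· < ·) := by
  intro t p primes
  fun_induction facLoop t p primes
  · -- divisible branch
    rename_i t p primes h hmod ih
    intro hp ht htx hsmall hprimes hcover hsort
    have hdvd : p ∣ t := (PySem.Int.mod_eq_zero_iff_dvd t p).mp hmod
    have hpp : Prime p := by
      apply pv_int_prime_of_no_small_div p (by omega)
      intro k hk2 hkk hkp
      exact hsmall k hk2 (by nlinarith) (hkp.trans hdvd)
    obtain ⟨s1, s2, s3, s4⟩ := stripFac_spec t p hp ht
    apply ih (by omega) s1 (s2.trans htx) ?_ ?_ ?_ ?_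
    · intro k hk2 hkp1 hkd
      rcases lt_or_ge k p with hlt | hge
      · exact hsmall k hk2 hlt (hkd.trans s2)
      · have : k = p := by omega
        rw [this] at hkd; exact s3 hkd
    · intro q hq
      rcases List.mem_append.mp hq with hq | hq
      · obtain ⟨a1, a2, a3, a4⟩ := hprimes q hq
        exact ⟨a1, a2, a3, by omega⟩
      · have : q = p := List.mem_singleton.mp hq
        subst this
        exact ⟨hpp, by omega, hdvd.trans htx, by omega⟩
    · intro r hr hr0 hrx
      rcases hcover r hr hr0 hrx with h | h
      · exact Or.inl (List.mem_append_left _ h)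
      · by_cases hrp : r ∣ p
        · left
          apply List.mem_append_right
          have : r = p := pv_prime_dvd_prime r p hr hpp hr0 (by omega) hrp
          rw [this]; exact List.mem_singleton_self p
        · exact Or.inr (s4 r hr h hrp)
    · apply List.pairwise_append.mpr
      refine ⟨hsort, List.pairwise_singleton _ _, ?_⟩
      intro a ha b hb
      rw [List.mem_singleton.mp hb]
      exact (hprimes a ha).2.2.2
  · -- not divisible branch
    rename_i t p primes h hmod ih
    intro hp ht htx hsmall hprimes hcover hsort
    apply ih (by omega) ht htx ?_ ?_ ?_ hsort
    · intro k hk2 hkp1 hkd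
      rcases lt_or_ge k p with hlt | hge
      · exact hsmall k hk2 hlt hkd
      · have : k = p := by omega
        rw [this] at hkd
        exact hmod ((PySem.Int.mod_eq_zero_iff_dvd t p).mpr hkd)
    · intro q hq
      obtain ⟨a1, a2, a3, a4⟩ := hprimes q hq
      exact ⟨a1, a2, a3, by omega⟩
    · exact hcover
  · -- exit
    rename_i t p primes h
    intro hp ht htx hsmall hprimes hcover hsort
    by_cases ht1 : 1 < t
    · have hpt : p ≤ t := by
        by_contra hc
        exact hsmall t (by omega) (by omega) (dvd_refl t)
      have htprime : Prime t := by
        apply pv_int_prime_of_no_small_div t ht1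
        intro k hk2 hkk hkd
        apply hsmall k hk2 ?_ hkd
        nlinarith [Int.le_of_dvd (by omega) hkd]
      simp only [if_pos ht1]
      refine ⟨?_, ?_, ?_⟩
      · intro q hq
        rcases List.mem_append.mp hq with hq | hq
        · obtain ⟨a1, a2, a3, _⟩ := hprimes q hq
          exact ⟨a1, a2, a3⟩
        · rw [List.mem_singleton.mp hq]
          exact ⟨htprime, by omega, htx⟩
      · intro r hr hr0 hrx
        rcases hcover r hr hr0 hrx with hh | hh
        · exact List.mem_append_left _ hh
        · apply List.mem_append_right
          have : r = t := pv_prime_dvd_prime r t hr htprime hr0 (by omega) hh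
          rw [this]; exact List.mem_singleton_self t
      · apply List.pairwise_append.mpr
        refine ⟨hsort, List.pairwise_singleton _ _, ?_⟩
        intro a ha b hb
        rw [List.mem_singleton.mp hb]
        have := (hprimes a ha).2.2.2
        omega
    · have ht1' : t = 1 := by omega
      simp only [if_neg ht1]
      refine ⟨?_, ?_, hsort⟩
      · intro q hq
        obtain ⟨a1, a2, a3, _⟩ := hprimes q hq
        exact ⟨a1, a2, a3⟩
      · intro r hr hr0 hrx
        rcases hcover r hr hr0 hrx with hh | hh
        · exact hh
        · exfalso
          rw [ht1'] at hh
          exact hr.not_unit (isUnit_of_dvd_one hh)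

theorem primesOf_spec (x : Int) (hx : 0 < x) :
    (∀ p ∈ primesOf x, Prime p ∧ 0 < p ∧ p ∣ x) ∧
      (∀ r : Int, Prime r → 0 < r → r ∣ x → r ∈ primesOf x) ∧
      (primesOf x).Pairwise (· ≠ ·) := by
  have h := facLoop_inv x hx x 2 [] (by omega) hx (dvd_refl x)
    (by intro k hk2 hk1 _; omega) (by intro q hq; simp at hq)
    (by intro r _ _ hrx; exact Or.inr hrx) List.Pairwise.nil
  obtain ⟨h1, h2, h3⟩ := h
  exact ⟨h1, h2, h3.imp (fun h => ne_of_lt h)⟩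

theorem pv_sum_map_neg (l : List (Int × Int)) (f : Int × Int → Int) :
    (l.map (fun x => -f x)).sum = -(l.map f).sum := by
  induction l with
  | nil => simp
  | cons a l ih => simp [ih]; ring

theorem divs_bundle (P : List Int) (hP : ∀ p ∈ P, Prime p ∧ 0 < p) (hnd : P.Pairwise (· ≠ ·)) :
    (0 < P.prod ∧ Squarefree P.prod)
    ∧ (∀ ds ∈ P.foldl divsStep [((1 : Int), (1 : Int))], 0 < ds.1 ∧ ds.1 ∣ P.prod)
    ∧ (∀ d : Int, 0 < d →
        ((P.foldl divsStep [((1 : Int), (1 : Int))]).map Prod.fst).count d = if d ∣ P.prod then 1 else 0)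
    ∧ (∀ y : Int,
        ((P.foldl divsStep [((1 : Int), (1 : Int))]).map (fun ds => ds.2 * (if ds.1 ∣ y then (1 : Int) else 0))).sum
          = if Int.gcd P.prod y = 1 then 1 else 0) := by
  induction P using List.reverseRecOn with
  | nil =>
    refine ⟨⟨one_pos, squarefree_one⟩, ?_, ?_, ?_⟩
    · intro ds hds
      simp only [List.foldl_nil, List.mem_singleton] at hds
      subst hds; exact ⟨one_pos, one_dvd 1⟩
    · intro d hd
      simp only [List.foldl_nil, List.map_cons, List.map_nil, List.prod_nil]
      by_cases h1 : d = 1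
      · subst h1; simp
      · have : ¬ d ∣ 1 := fun hc => h1 (Int.eq_one_of_dvd_one (by omega) hc)
        simp [this, List.count_singleton]
        omega
    · intro y
      simp [List.foldl_nil, Int.one_gcd]
  | append_singleton P q ih =>
    have hP' : ∀ p ∈ P, Prime p ∧ 0 < p := fun p hp => hP p (List.mem_append_left _ hp)
    have hq := hP q (List.mem_append_right _ (List.mem_singleton_self q))
    obtain ⟨hq1, hq0⟩ := hq
    obtain ⟨hndP, -, hcross⟩ := List.pairwise_append.mp hnd
    obtain ⟨⟨hN0, hNsq⟩, h2, h3, h4⟩ := ih hP' hndP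
    set N := P.prod with hNdef
    set L := P.foldl divsStep [((1 : Int), (1 : Int))] with hLdef
    have hfold : (P ++ [q]).foldl divsStep [((1 : Int), (1 : Int))] = divsStep L q := by
      rw [List.foldl_append]; rfl
    have hprod : (P ++ [q]).prod = N * q := by
      rw [List.prod_append, List.prod_singleton]
    have hqN : ¬ q ∣ N := by
      intro hc
      obtain ⟨a, ha, hqa⟩ := (Prime.dvd_prod_iff hq1).mp hc
      obtain ⟨ha1, ha0⟩ := hP' a ha
      exact (hcross a ha q (List.mem_singleton_self q)) (pv_prime_dvd_prime q a hq1 ha1 hq0 ha0 hqa).symm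
    have hqnz : q ≠ 0 := by omega
    have hkeys : (divsStep L q).map Prod.fst = L.map Prod.fst ++ (L.map Prod.fst).map (· * q) := by
      simp [divsStep, List.map_map, Function.comp_def]
    rw [hfold, hprod]
    refine ⟨⟨by positivity, ?_⟩, ?_, ?_, ?_⟩
    · -- Squarefree (N * q)
      rw [← Int.squarefree_natAbs, Int.natAbs_mul]
      have hqnP := Int.prime_iff_natAbs_prime.mp hq1
      have hcop : Nat.Coprime N.natAbs q.natAbs := by
        have := (Nat.Prime.coprime_iff_not_dvd hqnP).mpr
          (fun hc => hqN (Int.natAbs_dvd_natAbs.mp hc))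
        exact this.symm
      rw [Nat.squarefree_mul hcop]
      exact ⟨Int.squarefree_natAbs.mpr hNsq, hqnP.squarefree⟩
    · intro ds hds
      rcases List.mem_append.mp hds with h | h
      · obtain ⟨b1, b2⟩ := h2 ds h
        exact ⟨b1, b2.mul_right q⟩
      · obtain ⟨e, he, heq⟩ := List.mem_map.mp h
        obtain ⟨b1, b2⟩ := h2 e he
        rw [← heq]
        exact ⟨by positivity, mul_dvd_mul b2 (dvd_refl q)⟩
    · intro d hd
      rw [hkeys, List.count_append]
      by_cases hqd : q ∣ d
      · have hdN : ¬ d ∣ N := fun hc => hqN (hqd.trans hc)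
        set e := d / q with hedef
        have heq : e * q = d := Int.ediv_mul_cancel hqd
        have he0 : 0 < e := by nlinarith
        have hc1 : (L.map Prod.fst).count d = 0 := by rw [h3 d hd, if_neg hdN]
        have hc2 : ((L.map Prod.fst).map (· * q)).count d = (L.map Prod.fst).count e := by
          rw [← heq]
          exact List.count_map_of_injective _ _ (mul_left_injective₀ hqnz) e
        rw [hc1, hc2, h3 e he0]
        have hiff : e ∣ N ↔ d ∣ N * q := by
          rw [← heq]
          exact (mul_dvd_mul_iff_right hqnz).symm
        by_cases hh : e ∣ N
        · rw [if_pos hh, if_pos (hiff.mp hh)]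
        · rw [if_neg hh, if_neg (fun hc => hh (hiff.mpr hc))]
      · have hc2 : ((L.map Prod.fst).map (· * q)).count d = 0 := by
          apply List.count_eq_zero.mpr
          intro hc
          obtain ⟨e, _, heq⟩ := List.mem_map.mp hc
          exact hqd (Dvd.intro_left e heq)
        rw [hc2, h3 d hd]
        have hiff : d ∣ N ↔ d ∣ N * q := by
          constructor
          · exact fun h => h.mul_right q
          · intro h
            have hcop : IsCoprime d q :=
              ((Prime.coprime_iff_not_dvd hq1).mpr hqd).symm
            exact hcop.dvd_of_dvd_mul_right h
        by_cases hh : d ∣ N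
        · rw [if_pos hh, if_pos (hiff.mp hh), Nat.add_zero]
        · rw [if_neg hh, if_neg (fun hc => hh (hiff.mpr hc))]
    · intro y
      have hmap2 : ((L.map (fun ds => ((ds.1 * q, -ds.2) : Int × Int))).map
          (fun ds => ds.2 * (if ds.1 ∣ y then (1 : Int) else 0))) =
          L.map (fun ds => -ds.2 * (if ds.1 * q ∣ y then (1 : Int) else 0)) := by
        rw [List.map_map]; rfl
      simp only [divsStep, List.map_append, List.sum_append, hmap2]
      by_cases hqy : q ∣ y
      · have hcongr : L.map (fun ds => -ds.2 * (if ds.1 * q ∣ y then (1 : Int) else 0)) =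
            L.map (fun ds => -(ds.2 * (if ds.1 ∣ y then (1 : Int) else 0))) := by
          apply List.map_congr_left
          intro ds hds
          obtain ⟨b1, b2⟩ := h2 ds hds
          have hcop : IsCoprime ds.1 q :=
            ((Prime.coprime_iff_not_dvd hq1).mpr (fun hc => hqN (hc.trans b2))).symm
          have hiff : ds.1 * q ∣ y ↔ ds.1 ∣ y := by
            constructor
            · exact fun h => (dvd_mul_right ds.1 q).trans h
            · exact fun h => hcop.mul_dvd h hqy
          by_cases hh : ds.1 ∣ y
          · rw [if_pos (hiff.mpr hh), if_pos hh]; ring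
          · rw [if_neg (fun hc => hh (hiff.mp hc)), if_neg hh]; ring
        rw [hcongr, pv_sum_map_neg]
        have hne : Int.gcd (N * q) y ≠ 1 := by
          intro hc
          have hd1 : (↑q.natAbs : Int) ∣ N * q := by
            rw [Int.natAbs_dvd]; exact dvd_mul_left q N
          have hd2 : (↑q.natAbs : Int) ∣ y := by rw [Int.natAbs_dvd]; exact hqy
          have := Int.dvd_gcd hd1 hd2
          rw [hc] at this
          have h2le := (Int.prime_iff_natAbs_prime.mp hq1).two_le
          have := Nat.le_of_dvd one_pos this
          omega
        rw [if_neg hne]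
        ring
      · have hcongr : L.map (fun ds => -ds.2 * (if ds.1 * q ∣ y then (1 : Int) else 0)) =
            L.map (fun _ => (0 : Int)) := by
          apply List.map_congr_left
          intro ds _
          rw [if_neg (fun hc => hqy ((dvd_mul_left q ds.1).trans hc))]
          ring
        rw [hcongr, h4 y]
        have hiff : Int.gcd (N * q) y = 1 ↔ Int.gcd N y = 1 := by
          rw [← Int.isCoprime_iff_gcd_eq_one, ← Int.isCoprime_iff_gcd_eq_one,
            IsCoprime.mul_left_iff]
          have hcq : IsCoprime q y := (Prime.coprime_iff_not_dvd hq1).mpr hqy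
          exact ⟨fun h => h.1, fun h => ⟨h, hcq⟩⟩
        have hz : (L.map (fun _ => (0 : Int))).sum = 0 := by simp
        rw [hz]
        by_cases hh : Int.gcd N y = 1
        · rw [if_pos hh, if_pos (hiff.mpr hh)]; ring
        · rw [if_neg hh, if_neg (fun hc => hh (hiff.mp hc))]; ring

theorem gcd_ne_one_iff (a y : Int) (ha : 0 < a) :
    Int.gcd a y ≠ 1 ↔ ∃ r : Int, Prime r ∧ 0 < r ∧ r ∣ a ∧ r ∣ y := by
  constructor
  · intro h
    have hg0 : Int.gcd a y ≠ 0 := by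
      intro hc
      rw [Int.gcd_eq_zero_iff] at hc
      omega
    obtain ⟨rr, hrp, hrd⟩ := Nat.exists_prime_and_dvd h
    refine ⟨(rr : Int), ?_, by exact_mod_cast hrp.pos, ?_, ?_⟩
    · rw [Int.prime_iff_natAbs_prime]; simpa using hrp
    · exact (Int.natCast_dvd_natCast.mpr hrd).trans (Int.gcd_dvd_left a y)
    · exact (Int.natCast_dvd_natCast.mpr hrd).trans (Int.gcd_dvd_right a y)
  · rintro ⟨r, hrP, hr0, hra, hry⟩ hc
    have h1 : (↑r.natAbs : Int) ∣ a := by rw [Int.natAbs_dvd]; exact hra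
    have h2 : (↑r.natAbs : Int) ∣ y := by rw [Int.natAbs_dvd]; exact hry
    have := Int.dvd_gcd h1 h2
    rw [hc] at this
    have h2le := (Int.prime_iff_natAbs_prime.mp hrP).two_le
    have := Nat.le_of_dvd one_pos this
    omega

theorem prod_dvd_of_pairwise (P : List Int) (x : Int)
    (hP : ∀ p ∈ P, Prime p ∧ 0 < p ∧ p ∣ x) (hnd : P.Pairwise (· ≠ ·)) : P.prod ∣ x := by
  induction P with
  | nil => exact one_dvd x
  | cons q P ih =>
    obtain ⟨hq1, hq0, hqx⟩ := hP q (List.mem_cons_self ..)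
    have hP' : ∀ p ∈ P, Prime p ∧ 0 < p ∧ p ∣ x := fun p hp => hP p (List.mem_cons_of_mem _ hp)
    have hnd' := (List.pairwise_cons.mp hnd)
    have hprodP : P.prod ∣ x := ih hP' hnd'.2
    have hqN : ¬ q ∣ P.prod := by
      intro hc
      obtain ⟨a, haP, hqa⟩ := (Prime.dvd_prod_iff hq1).mp hc
      obtain ⟨ha1, ha0, _⟩ := hP' a haP
      exact (hnd'.1 a haP) (pv_prime_dvd_prime q a hq1 ha1 hq0 ha0 hqa)
    rw [List.prod_cons]
    exact ((Prime.coprime_iff_not_dvd hq1).mpr hqN).mul_dvd hqx hprodP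

theorem pv_prod_pos (P : List Int) (h : ∀ p ∈ P, 0 < p) : 0 < P.prod := by
  induction P with
  | nil => simp
  | cons q P ih =>
    rw [List.prod_cons]
    exact mul_pos (h q (List.mem_cons_self ..)) (ih (fun p hp => h p (List.mem_cons_of_mem _ hp)))

theorem gcd_prod_iff (x y : Int) (hx : 0 < x) :
    (Int.gcd (primesOf x).prod y = 1 ↔ Int.gcd x y = 1) := by
  obtain ⟨h1, h2, h3⟩ := primesOf_spec x hx
  have hN0 : 0 < (primesOf x).prod := pv_prod_pos _ (fun p hp => (h1 p hp).2.1)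
  rw [← not_iff_not,
    show (¬(primesOf x).prod.gcd y = 1) ↔ _ from gcd_ne_one_iff _ y hN0,
    show (¬ x.gcd y = 1) ↔ _ from gcd_ne_one_iff x y hx]
  constructor
  · rintro ⟨r, hrP, hr0, hrN, hry⟩
    obtain ⟨p, hpP, hrp⟩ := (Prime.dvd_prod_iff hrP).mp hrN
    exact ⟨r, hrP, hr0, hrp.trans (h1 p hpP).2.2, hry⟩
  · rintro ⟨r, hrP, hr0, hrx, hry⟩
    exact ⟨r, hrP, hr0, List.dvd_prod (h2 r hrP hr0 hrx), hry⟩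

theorem sqfree_dvd_prod (x : Int) (hx : 0 < x) (d : Int) (hd : 0 < d) (hsq : Squarefree d)
    (hdx : d ∣ x) : d ∣ (primesOf x).prod := by
  obtain ⟨h1, h2, h3⟩ := primesOf_spec x hx
  suffices H : ∀ n : Nat, ∀ d : Int, d.natAbs ≤ n → 0 < d → Squarefree d → d ∣ x →
      d ∣ (primesOf x).prod by
    exact H d.natAbs d le_rfl hd hsq hdx
  intro n
  induction n with
  | zero => intro d hn hd _ _; omega
  | succ n ih =>
    intro d hn hd hsq hdx
    by_cases hd1 : d = 1
    · rw [hd1]; exact one_dvd _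
    · have hd2 : 2 ≤ d := by omega
      have hna : d.natAbs ≠ 1 := by omega
      set rr := d.natAbs.minFac with hrrdef
      have hrrp : Nat.Prime rr := Nat.minFac_prime hna
      have hrrd : rr ∣ d.natAbs := Nat.minFac_dvd _
      set r := (rr : Int) with hrdef
      have hrP : Prime r := by rw [Int.prime_iff_natAbs_prime]; simpa using hrrp
      have hr0 : 0 < r := by rw [hrdef]; exact_mod_cast hrrp.pos
      have hr2 : 2 ≤ r := by rw [hrdef]; exact_mod_cast hrrp.two_le
      have hrd : r ∣ d := by
        rw [hrdef]; exact Int.natCast_dvd.mpr hrrd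
      have hrx : r ∣ x := hrd.trans hdx
      have hrN : r ∣ (primesOf x).prod := List.dvd_prod (h2 r hrP hr0 hrx)
      set e := d / r with hedef
      have heq : e * r = d := Int.ediv_mul_cancel hrd
      have he0 : 0 < e := by nlinarith
      have hed : e ∣ d := ⟨r, heq.symm⟩
      have hesq : Squarefree e := hsq.squarefree_of_dvd hed
      have hex : e ∣ x := hed.trans hdx
      have helt : e.natAbs ≤ n := by
        have : e < d := by nlinarith
        omega
      have heN : e ∣ (primesOf x).prod := ih e helt he0 hesq hex
      have hre : ¬ r ∣ e := by
        intro hc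
        obtain ⟨k, hk⟩ := hc
        have : r * r ∣ d := ⟨k, by rw [← heq, hk]; ring⟩
        exact hrP.not_unit (hsq r this)
      have hcop : IsCoprime e r := ((Prime.coprime_iff_not_dvd hrP).mpr hre).symm
      rw [← heq]
      exact hcop.mul_dvd heN hrN

theorem dvd_prod_iff_dvd (x : Int) (hx : 0 < x) (d : Int) (hd : 0 < d) (hsq : Squarefree d) :
    d ∣ (primesOf x).prod ↔ d ∣ x := by
  obtain ⟨h1, h2, h3⟩ := primesOf_spec x hx
  constructor
  · intro h
    exact h.trans (prod_dvd_of_pairwise _ x h1 h3)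
  · exact sqfree_dvd_prod x hx d hd hsq


theorem pv_sum_counts (L : List (Int × Int)) (x : Int)
    (hper : ∀ y : Int, (L.map (fun ds => ds.2 * (if 0 < y ∧ ds.1 ∣ y then (1 : Int) else 0))).sum
      = if 0 < y ∧ Int.gcd x y = 1 then 1 else 0) :
    ∀ seen : List Int,
      (L.map (fun ds => ds.2 * (seen.countP (fun y => decide (0 < y ∧ ds.1 ∣ y)) : Int))).sum
        = (seen.countP (fun y => decide (0 < y ∧ Int.gcd x y = 1)) : Int) := by
  intro seen
  induction seen with
  | nil => simp
  | cons z seen ih =>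
    have hmapeq : (L.map (fun ds => ds.2 * (((z :: seen).countP (fun y => decide (0 < y ∧ ds.1 ∣ y))) : Int)))
        = L.map (fun ds => ds.2 * ((seen.countP (fun y => decide (0 < y ∧ ds.1 ∣ y))) : Int)
            + ds.2 * (if 0 < z ∧ ds.1 ∣ z then (1 : Int) else 0)) := by
      apply List.map_congr_left
      intro ds _
      rw [List.countP_cons]
      by_cases hz : 0 < z ∧ ds.1 ∣ z
      · rw [if_pos hz]
        simp [hz]
        ring
      · rw [if_neg hz]
        simp [hz]
    rw [hmapeq, PySem.List.sum_map_add_int, ih, hper z, List.countP_cons]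
    by_cases hz : 0 < z ∧ Int.gcd x z = 1
    · simp [hz]
    · simp [hz]

theorem pv_shift (C : Int → Int → Prop) (x : Int) (rest seen : List Int) :
    (∃ (k : Nat) (hk : k < (x :: rest).length), ∃ y ∈ seen ++ (x :: rest).take k, C (x :: rest)[k] y)
    ↔ ((∃ y ∈ seen, C x y) ∨
        ∃ (k : Nat) (hk : k < rest.length), ∃ y ∈ (seen ++ [x]) ++ rest.take k, C rest[k] y) := by
  constructor
  · rintro ⟨k, hk, y, hy, hC⟩
    cases k with
    | zero =>
      left
      refine ⟨y, ?_, by simpa using hC⟩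
      simpa using hy
    | succ k =>
      right
      refine ⟨k, by simpa using hk, y, ?_, by simpa using hC⟩
      rw [List.take_succ_cons] at hy
      simp only [List.append_assoc, List.singleton_append]
      exact hy
  · rintro (⟨y, hy, hC⟩ | ⟨k, hk, y, hy, hC⟩)
    · exact ⟨0, by simp, y, by simpa using hy, by simpa using hC⟩
    · refine ⟨k + 1, by simpa using hk, y, ?_, by simpa using hC⟩
      rw [List.take_succ_cons]
      simp only [List.append_assoc, List.singleton_append] at hy
      exact hy

theorem altLoop_iff : ∀ (rest seen : List Int) (cnt : PySem.Dict Int Int),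
    (∀ d : Int, 0 < d → Squarefree d →
      cnt.getD d 0 = (seen.countP (fun y => decide (0 < y ∧ d ∣ y)) : Int)) →
    (altLoop cnt rest = true ↔
      ∃ (k : Nat) (hk : k < rest.length), ∃ y ∈ seen ++ rest.take k,
        0 < rest[k] ∧ 0 < y ∧ Int.gcd rest[k] y = 1) := by
  intro rest
  induction rest with
  | nil => intro seen cnt hinv; simp [altLoop]
  | cons x rest ih =>
    intro seen cnt hinv
    rw [pv_shift (fun a y => 0 < a ∧ 0 < y ∧ Int.gcd a y = 1) x rest seen]
    by_cases hx : x ≤ 0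
    · have hrec : altLoop cnt (x :: rest) = altLoop cnt rest := by
        simp [altLoop, hx]
      have hinv' : ∀ d : Int, 0 < d → Squarefree d →
          cnt.getD d 0 = (((seen ++ [x]).countP (fun y => decide (0 < y ∧ d ∣ y))) : Int) := by
        intro d hd hsq
        rw [List.countP_append, hinv d hd hsq]
        have : (List.countP (fun y => decide (0 < y ∧ d ∣ y)) [x]) = 0 := by
          simp [List.countP_cons]
          omega
        rw [this]
        simp
      rw [hrec, ih (seen ++ [x]) cnt hinv']
      constructor
      · exact Or.inr
      · rintro (⟨y, _, hC, _⟩ | h)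
        · omega
        · exact h
    · replace hx : 0 < x := by omega
      obtain ⟨hp1, hp2, hp3⟩ := primesOf_spec x hx
      obtain ⟨⟨hN0, hNsq⟩, b2, b3, b4⟩ := divs_bundle (primesOf x)
        (fun p hp => ⟨(hp1 p hp).1, (hp1 p hp).2.1⟩) hp3
      have hper : ∀ y : Int,
          (((primesOf x).foldl divsStep [((1 : Int), (1 : Int))]).map (fun ds => ds.2 * (if 0 < y ∧ ds.1 ∣ y then (1 : Int) else 0))).sum
            = if 0 < y ∧ Int.gcd x y = 1 then 1 else 0 := by
        intro y
        by_cases hy : 0 < y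
        · have hcongr : ((primesOf x).foldl divsStep [((1 : Int), (1 : Int))]).map (fun ds => ds.2 * (if 0 < y ∧ ds.1 ∣ y then (1 : Int) else 0))
              = ((primesOf x).foldl divsStep [((1 : Int), (1 : Int))]).map (fun ds => ds.2 * (if ds.1 ∣ y then (1 : Int) else 0)) := by
            apply List.map_congr_left
            intro ds _
            by_cases hh : ds.1 ∣ y
            · rw [if_pos ⟨hy, hh⟩, if_pos hh]
            · rw [if_neg (fun hc => hh hc.2), if_neg hh]
          rw [hcongr, b4 y]
          have hgg := gcd_prod_iff x y hx
          by_cases hh : Int.gcd x y = 1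
          · rw [if_pos (hgg.mpr hh), if_pos ⟨hy, hh⟩]
          · rw [if_neg (fun hc => hh (hgg.mp hc)), if_neg (fun hc => hh hc.2)]
        · have hcongr : ((primesOf x).foldl divsStep [((1 : Int), (1 : Int))]).map (fun ds => ds.2 * (if 0 < y ∧ ds.1 ∣ y then (1 : Int) else 0))
              = ((primesOf x).foldl divsStep [((1 : Int), (1 : Int))]).map (fun _ => (0 : Int)) := by
            apply List.map_congr_left
            intro ds _
            rw [if_neg (fun hc => hy hc.1)]
            ring
          rw [hcongr, if_neg (fun hc => hy hc.1)]
          simp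
      have hquery : (((primesOf x).foldl divsStep [((1 : Int), (1 : Int))]).map (fun ds => ds.2 * cnt.getD ds.1 0)).sum
          = ((seen.countP (fun y => decide (0 < y ∧ Int.gcd x y = 1))) : Int) := by
        have hcongr : ((primesOf x).foldl divsStep [((1 : Int), (1 : Int))]).map (fun ds => ds.2 * cnt.getD ds.1 0)
            = ((primesOf x).foldl divsStep [((1 : Int), (1 : Int))]).map (fun ds => ds.2 * ((seen.countP (fun y => decide (0 < y ∧ ds.1 ∣ y))) : Int)) := by
          apply List.map_congr_left
          intro ds hds
          obtain ⟨hds1, hds2⟩ := b2 ds hds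
          rw [hinv ds.1 hds1 (hNsq.squarefree_of_dvd hds2)]
        rw [hcongr]
        exact pv_sum_counts ((primesOf x).foldl divsStep [((1 : Int), (1 : Int))]) x hper seen
      have hunfold : altLoop cnt (x :: rest) =
          if 0 < (((primesOf x).foldl divsStep [((1 : Int), (1 : Int))]).map (fun ds => ds.2 * cnt.getD ds.1 0)).sum then true
          else altLoop (((primesOf x).foldl divsStep [((1 : Int), (1 : Int))]).foldl (fun c ds => c.modify ds.1 0 (· + 1)) cnt) rest := by
        simp only [altLoop, if_neg (by omega : ¬ x ≤ 0)]
      rw [hunfold, hquery]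
      by_cases hpos : 0 < ((seen.countP (fun y => decide (0 < y ∧ Int.gcd x y = 1))) : Int)
      · rw [if_pos hpos]
        have hcp : 0 < seen.countP (fun y => decide (0 < y ∧ Int.gcd x y = 1)) := by exact_mod_cast hpos
        obtain ⟨y, hy, hyp⟩ := List.countP_pos_iff.mp hcp
        simp only [decide_eq_true_iff] at hyp
        constructor
        · intro _
          exact Or.inl ⟨y, hy, hx, hyp.1, hyp.2⟩
        · intro _; rfl
      · rw [if_neg hpos]
        have hcz : seen.countP (fun y => decide (0 < y ∧ Int.gcd x y = 1)) = 0 := by omega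
        have hinv'' : ∀ d : Int, 0 < d → Squarefree d →
            (((primesOf x).foldl divsStep [((1 : Int), (1 : Int))]).foldl (fun c ds => c.modify ds.1 0 (· + 1)) cnt).getD d 0
              = (((seen ++ [x]).countP (fun y => decide (0 < y ∧ d ∣ y))) : Int) := by
          intro d hd hsq
          have hfm : ((primesOf x).foldl divsStep [((1 : Int), (1 : Int))]).foldl (fun c ds => c.modify ds.1 0 (· + 1)) cnt
              = (((primesOf x).foldl divsStep [((1 : Int), (1 : Int))]).map Prod.fst).foldl (fun c k => c.modify k 0 (· + 1)) cnt := by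
            rw [List.foldl_map]
          rw [hfm, PySem.Dict.getD_foldl_modify_add_one, hinv d hd hsq, b3 d hd]
          rw [List.countP_append]
          have hone : (List.countP (fun y => decide (0 < y ∧ d ∣ y)) [x])
              = if d ∣ x then 1 else 0 := by
            by_cases hh : d ∣ x
            · simp [hh, hx]
            · simp [hh]
          rw [hone]
          have hdd := dvd_prod_iff_dvd x hx d hd hsq
          by_cases hh : d ∣ x
          · rw [if_pos (hdd.mpr hh), if_pos hh]
            push_cast
            ring
          · rw [if_neg (fun hc => hh (hdd.mp hc)), if_neg hh]
            push_cast
            ring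
        rw [ih (seen ++ [x]) _ hinv'']
        have hnone : ¬ ∃ y ∈ seen, 0 < x ∧ 0 < y ∧ Int.gcd x y = 1 := by
          rintro ⟨y, hy, -, hy0, hg⟩
          have := List.countP_eq_zero.mp hcz y hy
          simp only [decide_eq_true_iff] at this
          exact this ⟨hy0, hg⟩
        constructor
        · exact Or.inr
        · rintro (h | h)
          · exact absurd h hnone
          · exact h


theorem pv_getElem_mem_take (l : List Int) (i k : Nat) (hik : i < k) (hk : k < l.length) :
    l[i] ∈ l.take k := by
  have h2 : i < (l.take k).length := by simp; omega
  have h3 : (l.take k)[i] = l[i] := List.getElem_take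
  rw [← h3]
  exact List.getElem_mem h2

theorem func30_alt_iff (arr : List Int) : func30_alt arr = true ↔ PairProp arr := by
  unfold func30_alt
  by_cases h1 : (1 : Int) ∈ arr
  · rw [if_pos (by simpa using h1)]
    exact ⟨fun _ => Or.inl h1, fun _ => rfl⟩
  · rw [if_neg (by simpa using h1)]
    have hinv0 : ∀ d : Int, 0 < d → Squarefree d →
        (PySem.Dict.empty : PySem.Dict Int Int).getD d 0
          = ((([] : List Int).countP (fun y => decide (0 < y ∧ d ∣ y))) : Int) := by
      intro d _ _
      simp [PySem.Dict.getD_empty]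
    rw [altLoop_iff arr [] PySem.Dict.empty hinv0]
    constructor
    · rintro ⟨k, hk, y, hy, hxk, hy0, hg⟩
      rw [List.nil_append] at hy
      have hyarr : y ∈ arr := List.mem_of_mem_take hy
      have hkarr : arr[k] ∈ arr := List.getElem_mem hk
      by_cases heq : arr[k] = y
      · exfalso
        rw [heq, Int.gcd_self] at hg
        have : y = 1 := by omega
        exact h1 (this ▸ hyarr)
      · exact Or.inr ⟨arr[k], y, hkarr, hyarr, hxk, hy0, heq, hg⟩
    · rintro (h | ⟨a, b, ha, hb, hpa, hpb, hab, hg⟩)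
      · exact absurd h h1
      · obtain ⟨ia, hia, hsa⟩ := List.getElem_of_mem ha
        obtain ⟨ib, hib, hsb⟩ := List.getElem_of_mem hb
        have hne : ia ≠ ib := by
          intro hh
          subst hh
          exact hab (hsa.symm.trans hsb)
        rcases lt_or_gt_of_ne hne with hlt | hgt
        · refine ⟨ib, hib, a, ?_, ?_, hpa, ?_⟩
          · rw [List.nil_append, ← hsa]
            exact pv_getElem_mem_take arr ia ib hlt hib
          · rw [hsb]; exact hpb
          · rw [hsb, Int.gcd_comm]; exact hg
        · refine ⟨ia, hia, b, ?_, ?_, hpb, ?_⟩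
          · rw [List.nil_append, ← hsb]
            exact pv_getElem_mem_take arr ib ia hgt hia
          · rw [hsa]; exact hpa
          · rw [hsa]; exact hg

-- ===== VERDICT (by name: the statement is the Claim_ definition above) =====
theorem func30_spec : Claim_equal_func30 := by
  intro arr _hdom _hpre
  unfold Spec_func30
  by_cases hp : PairProp arr
  · rw [(func30_iff arr).mpr hp, (func30_alt_iff arr).mpr hp]
  · have h1 : func30 arr = false := by
      cases h : func30 arr
      · rfl
      · exact absurd ((func30_iff arr).mp h) hp
    have h2 : func30_alt arr = false := by
      cases h : func30_alt arr
      · rfl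
      · exact absurd ((func30_alt_iff arr).mp h) hp
    rw [h1, h2]
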